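-- pv_equiv track=rewrite | github.com/zafrem/pii-pattern-engine | verification/python/verification.py | not_repeating_pattern
-- ===== SOURCE A (Python) =====
-- def not_repeating_pattern(value: str) -> bool:
--     """
--     Verify that a value is not a simple repeating pattern.
--
--     Rejects patterns like:
--     - All same character: "1111111", "AAAAAAA"
--     - Two-char repeat: "121212", "ABABAB"
--     - Three-char repeat: "123123123"
--     - Sequential: "12345678", "ABCDEFGH"
--
--     Args:
--         value: String to check
--
--     Returns:
--         True if NOT a repeating pattern, False if is a repeating pattern
--     """
--     if not value:
--         return True
--
--     # Normalize for numeric strings (remove hyphens, spaces)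
--     normalized = "".join(c for c in value if c.isdigit())
--     if not normalized:
--         # If no digits, use the original string for basic checks
--         normalized = value
--
--     # Check all same character (VERY IMPORTANT for 010-0000-0000)
--     if len(set(normalized)) == 1:
--         return False
--
--     if len(normalized) < 4:
--         return True
--
--     # Check for sequential digits
--     if normalized.isdigit() and len(normalized) >= 4:
--         is_ascending = all(
--             int(normalized[i]) == int(normalized[i - 1]) + 1
--             for i in range(1, len(normalized))
--         )
--         is_descending = all(
--             int(normalized[i]) == int(normalized[i - 1]) - 1
--             for i in range(1, len(normalized))
--         )
--         if is_ascending or is_descending: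
--             return False
--
--     # Check for 2-char repeating pattern
--     if len(normalized) >= 4:
--         pattern2 = normalized[:2]
--         if pattern2 * (len(normalized) // 2) == normalized[
--             : len(pattern2) * (len(normalized) // 2)
--         ]:
--             if (
--                 len(normalized) % 2 == 0
--                 or normalized[-(len(normalized) % 2) :] == pattern2[: len(normalized) % 2]
--             ):
--                 return False
--
--     # Check for 3-char repeating pattern
--     if len(normalized) >= 6:
--         pattern3 = normalized[:3]
--         if pattern3 * (len(normalized) // 3) == normalized[
--             : len(pattern3) * (len(normalized) // 3)
--         ]:
--             if (
--                 len(normalized) % 3 == 0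
--                 or normalized[-(len(normalized) % 3) :] == pattern3[: len(normalized) % 3]
--             ):
--                 return False
--
--     return True
-- ===== SOURCE B (Python) =====
-- def _is_periodic(s, p):
--     """True iff s has period p: each element equals the one p positions earlier."""
--     return all(s[i] == s[i - p] for i in range(p, len(s)))
--
--
-- def not_repeating_pattern(value: str) -> bool:
--     if not value:
--         return True
--     digits = [c for c in value if c.isdigit()]
--     s = digits if digits else list(value)
--     if all(c == s[0] for c in s):
--         return False
--     n = len(s)
--     if n < 4:
--         return True
--     if digits:
--         d = [ord(c) - 48 for c in digits]
--         if all(d[i] - d[i - 1] == 1 for i in range(1, n)) or all(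
--             d[i] - d[i - 1] == -1 for i in range(1, n)
--         ):
--             return False
--     if _is_periodic(s, 2):
--         return False
--     if n >= 6 and _is_periodic(s, 3):
--         return False
--     return True
-- ===== Notes on version B (the rewrite author's own statement) =====
-- stated objective: simpler
-- what changed: The two copy-paste period blocks that build pattern*count and compare slices with a modulo tail fix-up are replaced by one is_periodic(s,p) helper comparing each char to the one p earlier; the set-size-1 test becomes an all-equal-to-first scan and the sequential test a single difference pass, avoiding the temporary string building and int() parsing per char.
import Mathlib
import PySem

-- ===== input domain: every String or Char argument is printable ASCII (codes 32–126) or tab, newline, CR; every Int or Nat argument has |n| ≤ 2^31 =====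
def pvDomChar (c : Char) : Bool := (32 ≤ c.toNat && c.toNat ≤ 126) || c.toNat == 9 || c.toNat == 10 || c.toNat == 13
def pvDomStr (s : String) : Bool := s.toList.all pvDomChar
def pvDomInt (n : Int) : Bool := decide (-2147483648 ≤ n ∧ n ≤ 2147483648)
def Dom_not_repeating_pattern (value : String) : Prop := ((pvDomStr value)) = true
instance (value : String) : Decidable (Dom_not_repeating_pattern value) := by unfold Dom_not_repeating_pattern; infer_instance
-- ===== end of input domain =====

-- B replaces A's two copy-paste period blocks (pattern*count built and compared to slices,
-- with a modulo tail fix-up) by one pointwise is_periodic helper, the set-size-1 test by an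
-- all-equal-to-first scan, and the sequential test by a single difference pass (objective: simpler).

-- ===== PORT A =====
-- int(c) for a single character c — exact under A's preceding normalized.isdigit() guard
def pvDigitVal (c : Char) : Int := (c.toNat : Int) - 48

def pvAcore (l : List Char) : Bool :=
  if l.isEmpty then true                                   -- if not value: return True
  else
    -- normalized = "".join(c for c in value if c.isdigit()); if not normalized: normalized = value
    let digits := l.filter PySem.Chars.isdigit
    let normalized := if digits.isEmpty then l else digits
    if (PySem.Set.ofList normalized).length == 1 then false  -- len(set(normalized)) == 1
    else if normalized.length < 4 then true
    else
      let n := normalized.length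
      -- if normalized.isdigit() and len(normalized) >= 4: is_ascending / is_descending
      -- (indices of range(1, n) are in bounds, so getD is exact for normalized[i])
      let seq :=
        if PySem.Chars.strIsdigit normalized && decide (4 ≤ n) then
          ((List.range' 1 (n - 1)).all fun i =>
              pvDigitVal (normalized.getD i ' ') == pvDigitVal (normalized.getD (i - 1) ' ') + 1)
          || ((List.range' 1 (n - 1)).all fun i =>
              pvDigitVal (normalized.getD i ' ') == pvDigitVal (normalized.getD (i - 1) ' ') - 1)
        else false
      if seq then false
      else
        -- if len(normalized) >= 4: 2-char repeating pattern block
        let pattern2 := normalized.take 2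
        if decide (4 ≤ n) &&
            ((PySem.List.pyRepeat pattern2 ((n / 2 : Nat) : Int) == normalized.take (pattern2.length * (n / 2)))
             && ((n % 2 == 0)
                 || PySem.List.slice normalized (some (-((n % 2 : Nat) : Int))) none == pattern2.take (n % 2)))
        then false
        else
          -- if len(normalized) >= 6: 3-char repeating pattern block
          let pattern3 := normalized.take 3
          if decide (6 ≤ n) &&
              ((PySem.List.pyRepeat pattern3 ((n / 3 : Nat) : Int) == normalized.take (pattern3.length * (n / 3)))
               && ((n % 3 == 0)
                   || PySem.List.slice normalized (some (-((n % 3 : Nat) : Int))) none == pattern3.take (n % 3)))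
          then false
          else true

def not_repeating_pattern (value : String) : Bool := pvAcore value.toList

-- ===== PORT B =====
-- all(s[i] == s[i - p] for i in range(p, len(s)))
def pvIsPeriodic (s : List Char) (p : Nat) : Bool :=
  (List.range' p (s.length - p)).all fun i => s.getD i ' ' == s.getD (i - p) ' '

def pvBcore (l : List Char) : Bool :=
  if l.isEmpty then true
  else
    let digits := l.filter PySem.Chars.isdigit
    let s := if digits.isEmpty then l else digits
    if s.all (fun c => c == s.headD ' ') then false        -- all(c == s[0] for c in s)
    else
      let n := s.length
      if n < 4 then true
      else if !digits.isEmpty &&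
          (let d := digits.map fun c => (c.toNat : Int) - 48
           ((List.range' 1 (n - 1)).all fun i => d.getD i 0 - d.getD (i - 1) 0 == 1)
           || ((List.range' 1 (n - 1)).all fun i => d.getD i 0 - d.getD (i - 1) 0 == -1))
      then false
      else if pvIsPeriodic s 2 then false
      else if decide (6 ≤ n) && pvIsPeriodic s 3 then false
      else true

def not_repeating_pattern_alt (value : String) : Bool := pvBcore value.toList

-- ===== PRECONDITION & SPEC =====
def Spec_not_repeating_pattern (value : String) (out : Bool) : Prop := out = not_repeating_pattern_alt value
instance (value : String) (out : Bool) : Decidable (Spec_not_repeating_pattern value out) := by unfold Spec_not_repeating_pattern; infer_instance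

-- ===== CLAIM (what is proved, stated in full; the proofs are below) =====
def Claim_equal_not_repeating_pattern : Prop := ∀ (value : String), Dom_not_repeating_pattern value → Spec_not_repeating_pattern value (not_repeating_pattern value)

-- ===== LEMMAS AND PROOFS =====

lemma pv_foldl_add_subset {s : List Char} (t : List Char) (h : ∀ c ∈ t, c ∈ s) :
    List.foldl PySem.Set.add s t = s := by
  induction t with
  | nil => rfl
  | cons a t ih =>
    have ha : a ∈ s := h a (by simp)
    have : PySem.Set.add s a = s := by
      simp only [PySem.Set.add]
      rw [if_pos (by simpa using ha)]
    rw [List.foldl_cons, this]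
    exact ih fun c hc => h c (by simp [hc])

lemma pv_set_card_one (s : List Char) (hs : s ≠ []) :
    ((PySem.Set.ofList s).length == 1) = s.all (fun c => c == s.headD ' ') := by
  obtain ⟨a, t, rfl⟩ := List.exists_cons_of_ne_nil hs
  rw [Bool.eq_iff_iff]
  simp only [beq_iff_eq, List.all_cons, List.all_eq_true, List.headD_cons, Bool.and_eq_true]
  constructor
  · intro h1
    obtain ⟨x, hx⟩ := List.length_eq_one_iff.mp h1
    have hmem : ∀ c, c ∈ PySem.Set.ofList (a :: t) ↔ c ∈ a :: t := fun c => PySem.Set.mem_ofList _ _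
    have hax : a = x := by
      have := (hmem a).mpr (by simp)
      rw [hx] at this; simpa using this
    refine ⟨by simp, fun c hc => ?_⟩
    have := (hmem c).mpr (by simp [hc])
    rw [hx] at this; simp [← hax] at this; simp [this]
  · rintro ⟨-, hall⟩
    have : PySem.Set.ofList (a :: t) = [a] := by
      have : PySem.Set.ofList (a :: t) = List.foldl PySem.Set.add [a] t := by
        simp [PySem.Set.ofList, PySem.Set.add, PySem.Set.empty, PySem.Set.contains]
      rw [this, pv_foldl_add_subset t (fun c hc => by simp [hall c hc])]
    simp [this]

lemma pv_rep_get (P : List Char) (p : Nat) (_hp : 0 < p) (hP : P.length = p) :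
    ∀ (k i : Nat), ((List.replicate k P).flatten)[i]? = if i < p * k then P[i % p]? else none := by
  intro k
  induction k with
  | zero => intro i; simp
  | succ k ih =>
    intro i
    rw [List.replicate_succ, List.flatten_cons]
    by_cases hi : i < p
    · rw [List.getElem?_append_left (by omega), if_pos (by rw [Nat.mul_succ]; omega),
        Nat.mod_eq_of_lt hi]
    · rw [List.getElem?_append_right (by omega), hP, ih (i - p)]
      have hmod : (i - p) % p = i % p := by
        conv_rhs => rw [← Nat.sub_add_cancel (Nat.le_of_not_lt hi)]
        rw [Nat.add_mod_right]
      have hiff : (i - p < p * k) ↔ (i < p * (k + 1)) := by rw [Nat.mul_succ]; omega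
      rw [hmod]
      by_cases h2 : i - p < p * k
      · rw [if_pos h2, if_pos (hiff.mp h2)]
      · rw [if_neg h2, if_neg fun hh => h2 (hiff.mpr hh)]

lemma pv_part1_iff (s : List Char) (p : Nat) (hp : 0 < p) (hpn : p ≤ s.length) :
    (PySem.List.pyRepeat (s.take p) ((s.length / p : Nat) : Int)
        = s.take ((s.take p).length * (s.length / p)))
    ↔ ∀ i < p * (s.length / p), s[i]? = s[i % p]? := by
  have hP : (s.take p).length = p := by rw [List.length_take]; omega
  rw [hP]
  constructor
  · intro h i hi
    have hgi := congrArg (fun t => t[i]?) h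
    simp only [PySem.List.pyRepeat, Int.toNat_natCast, pv_rep_get _ p hp hP,
      List.getElem?_take] at hgi
    rw [if_pos hi, if_pos (Nat.mod_lt i hp), if_pos hi] at hgi
    exact hgi.symm
  · intro h
    apply List.ext_getElem?
    intro i
    simp only [PySem.List.pyRepeat, Int.toNat_natCast, pv_rep_get _ p hp hP,
      List.getElem?_take]
    by_cases hi : i < p * (s.length / p)
    · rw [if_pos hi, if_pos (Nat.mod_lt i hp), if_pos hi]
      exact (h i hi).symm
    · rw [if_neg hi, if_neg hi]

lemma pv_part2_iff (s : List Char) (p : Nat) (hp : 0 < p) (_hpn : p ≤ s.length)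
    (hr0 : s.length % p ≠ 0) :
    (PySem.List.slice s (some (-((s.length % p : Nat) : Int))) none
        = (s.take p).take (s.length % p))
    ↔ ∀ j < s.length % p, s[p * (s.length / p) + j]? = s[j]? := by
  have hrp : s.length % p < p := Nat.mod_lt _ hp
  have hdm : p * (s.length / p) + s.length % p = s.length := Nat.div_add_mod s.length p
  rw [PySem.List.slice_from_neg_natCast s _ (Nat.pos_of_ne_zero hr0)]
  rw [List.take_take, Nat.min_eq_left (le_of_lt hrp)]
  have hnr : s.length - s.length % p = p * (s.length / p) := by omega
  rw [hnr]
  constructor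
  · intro h j hj
    have hgj := congrArg (fun t => t[j]?) h
    simp only [List.getElem?_drop, List.getElem?_take] at hgj
    rw [if_pos hj] at hgj
    exact hgj
  · intro h
    apply List.ext_getElem?
    intro j
    rw [List.getElem?_drop, List.getElem?_take]
    by_cases hj : j < s.length % p
    · rw [if_pos hj]; exact h j hj
    · rw [if_neg hj, List.getElem?_eq_none (by omega)]

lemma pv_mod_of_per (s : List Char) (p : Nat) (hp : 0 < p)
    (h : ∀ i, p ≤ i → i < s.length → s[i]? = s[i - p]?) :
    ∀ i, i < s.length → s[i]? = s[i % p]? := by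
  intro i
  induction i using Nat.strong_induction_on with
  | _ i ih =>
    intro hi
    by_cases hip : p ≤ i
    · have h2 := ih (i - p) (by omega) (by omega)
      have hmod : (i - p) % p = i % p := by
        conv_rhs => rw [← Nat.sub_add_cancel hip]
        rw [Nat.add_mod_right]
      rw [h i hip hi, h2, hmod]
    · rw [Nat.mod_eq_of_lt (by omega)]

lemma pv_period_eq (s : List Char) (p : Nat) (hp : 0 < p) (hlen : 2 * p ≤ s.length) :
    ((PySem.List.pyRepeat (s.take p) ((s.length / p : Nat) : Int)
        == s.take ((s.take p).length * (s.length / p)))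
     && ((s.length % p == 0)
         || PySem.List.slice s (some (-((s.length % p : Nat) : Int))) none
              == (s.take p).take (s.length % p)))
    = pvIsPeriodic s p := by
  have hpn : p ≤ s.length := by omega
  have hdm : p * (s.length / p) + s.length % p = s.length := Nat.div_add_mod s.length p
  have hrp : s.length % p < p := Nat.mod_lt _ hp
  have hk2 : 2 ≤ s.length / p := (Nat.le_div_iff_mul_le hp).mpr (by omega)
  have hpk2 : 2 * p ≤ p * (s.length / p) := by
    calc 2 * p = p * 2 := by ring
    _ ≤ p * (s.length / p) := Nat.mul_le_mul_left _ hk2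
  rw [Bool.eq_iff_iff]
  simp only [Bool.and_eq_true, Bool.or_eq_true, beq_iff_eq, pvIsPeriodic, List.all_eq_true,
    List.mem_range'_1]
  -- bridge B's getD-test to getElem?
  have hbridge : (∀ i, p ≤ i ∧ i < p + (s.length - p) → s.getD i ' ' = s.getD (i - p) ' ')
      ↔ ∀ i, p ≤ i → i < s.length → s[i]? = s[i - p]? := by
    constructor
    · intro h i hpi hin
      have hh := h i ⟨hpi, by omega⟩
      rw [List.getD_eq_getElem s ' ' hin, List.getD_eq_getElem s ' ' (by omega)] at hh
      rw [List.getElem?_eq_getElem hin, List.getElem?_eq_getElem (show i - p < s.length by omega), hh]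
    · intro h i ⟨hpi, hin⟩
      have hh := h i hpi (by omega)
      rw [List.getElem?_eq_getElem (by omega), List.getElem?_eq_getElem (show i - p < s.length by omega)] at hh
      rw [List.getD_eq_getElem s ' ' (by omega), List.getD_eq_getElem s ' ' (by omega)]
      exact Option.some_injective _ hh
  rw [hbridge, pv_part1_iff s p hp hpn]
  constructor
  · rintro ⟨h1, h2⟩ i hpi hin
    by_cases hik : i < p * (s.length / p)
    · rw [h1 i hik, h1 (i - p) (by omega)]
      congr 1
      conv_lhs => rw [← Nat.sub_add_cancel hpi]
      rw [Nat.add_mod_right]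
    · -- tail region: i = p*k + j with j < r, and r ≠ 0
      have hr0 : s.length % p ≠ 0 := by omega
      rcases h2 with h2 | h2
      · omega
      · rw [pv_part2_iff s p hp hpn hr0] at h2
        have hj := h2 (i - p * (s.length / p)) (by omega)
        have hi_eq : p * (s.length / p) + (i - p * (s.length / p)) = i := by omega
        rw [hi_eq] at hj
        rw [hj, h1 (i - p) (by omega)]
        have hjp : i - p * (s.length / p) < p := by omega
        have : (i - p) % p = i % p := by
          conv_rhs => rw [← Nat.sub_add_cancel hpi]
          rw [Nat.add_mod_right]
        rw [this]
        have : i % p = i - p * (s.length / p) := by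
          conv_lhs => rw [← hi_eq]
          rw [Nat.mul_add_mod]
          exact Nat.mod_eq_of_lt hjp
        rw [this]
  · intro h
    have hmod := pv_mod_of_per s p hp h
    refine ⟨fun i hik => hmod i (by omega), ?_⟩
    by_cases hr0 : s.length % p = 0
    · exact Or.inl hr0
    · refine Or.inr ((pv_part2_iff s p hp hpn hr0).mpr fun j hj => ?_)
      rw [hmod (p * (s.length / p) + j) (by omega), Nat.mul_add_mod,
        Nat.mod_eq_of_lt (by omega)]

lemma pv_all_congr_mem {α : Type} (xs : List α) (f g : α → Bool)
    (h : ∀ x ∈ xs, f x = g x) : xs.all f = xs.all g := by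
  induction xs with
  | nil => rfl
  | cons a t ih =>
    simp only [List.all_cons, h a (by simp), ih fun x hx => h x (by simp [hx])]

lemma pv_getD_map (t : List Char) (i : Nat) (hi : i < t.length) :
    (t.map fun c => (c.toNat : Int) - 48).getD i 0 = pvDigitVal (t.getD i ' ') := by
  rw [List.getD_eq_getElem _ _ (by simpa using hi), List.getD_eq_getElem _ _ hi, List.getElem_map]
  rfl

lemma pv_beq_succ (a b : Int) : (a == b + 1) = (a - b == 1) := by
  rw [Bool.eq_iff_iff]; simp only [beq_iff_eq]; omega

lemma pv_beq_pred (a b : Int) : (a == b - 1) = (a - b == -1) := by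
  rw [Bool.eq_iff_iff]; simp only [beq_iff_eq]; omega

-- filter produces [] iff no char passes; a nonempty all-digit string has nonempty filter
lemma pv_strIsdigit_of_filter_empty (l : List Char) (hl : ¬l.isEmpty)
    (h : l.filter PySem.Chars.isdigit = []) : PySem.Chars.strIsdigit l = false := by
  simp only [PySem.Chars.strIsdigit, hl, Bool.not_false, Bool.true_and]
  rw [List.all_eq_false]
  rcases List.exists_mem_of_ne_nil l (by simpa using hl) with ⟨a, ha⟩
  refine ⟨a, ha, ?_⟩
  intro hd
  have : a ∈ l.filter PySem.Chars.isdigit := List.mem_filter.mpr ⟨ha, hd⟩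
  simp [h] at this

lemma pv_strIsdigit_filter (l : List Char) (h : ¬(l.filter PySem.Chars.isdigit).isEmpty) :
    PySem.Chars.strIsdigit (l.filter PySem.Chars.isdigit) = true := by
  simp only [PySem.Chars.strIsdigit, h, Bool.not_false, Bool.true_and, List.all_eq_true]
  exact fun c hc => List.of_mem_filter hc
lemma pv_main (l : List Char) : pvAcore l = pvBcore l := by
  by_cases h0 : l.isEmpty
  · simp [pvAcore, pvBcore, h0]
  · simp only [pvAcore, pvBcore]
    set digits := l.filter PySem.Chars.isdigit with hdig
    set ns := if digits.isEmpty then l else digits with hns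
    rw [if_neg h0, if_neg h0]
    have hne : ns ≠ [] := by
      rw [hns]; split_ifs with hd
      · simpa using h0
      · simpa using hd
    rw [pv_set_card_one _ hne]
    by_cases hall : (ns.all fun c => c == ns.headD ' ') = true
    · rw [if_pos hall, if_pos hall]
    · rw [if_neg hall, if_neg hall]
      by_cases h4 : ns.length < 4
      · rw [if_pos h4, if_pos h4]
      · rw [if_neg h4, if_neg h4]
        have hseq :
            (if PySem.Chars.strIsdigit ns && decide (4 ≤ ns.length) then
                ((List.range' 1 (ns.length - 1)).all fun i =>
                    pvDigitVal (ns.getD i ' ') == pvDigitVal (ns.getD (i - 1) ' ') + 1)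
                || ((List.range' 1 (ns.length - 1)).all fun i =>
                    pvDigitVal (ns.getD i ' ') == pvDigitVal (ns.getD (i - 1) ' ') - 1)
              else false)
            = (!digits.isEmpty &&
                (((List.range' 1 (ns.length - 1)).all fun i =>
                    (digits.map fun c => (c.toNat : Int) - 48).getD i 0
                      - (digits.map fun c => (c.toNat : Int) - 48).getD (i - 1) 0 == 1)
                 || ((List.range' 1 (ns.length - 1)).all fun i =>
                    (digits.map fun c => (c.toNat : Int) - 48).getD i 0
                      - (digits.map fun c => (c.toNat : Int) - 48).getD (i - 1) 0 == -1))) := by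
          by_cases hd : digits.isEmpty
          · have hnsl : ns = l := by rw [hns, if_pos hd]
            rw [hd, hnsl, pv_strIsdigit_of_filter_empty l h0 (List.isEmpty_iff.mp hd)]
            simp
          · have hnsl : ns = digits := by rw [hns, if_neg hd]
            have hsd : PySem.Chars.strIsdigit digits = true := pv_strIsdigit_filter l hd
            rw [hnsl] at h4 ⊢
            have h4' : decide (4 ≤ digits.length) = true := decide_eq_true (by omega)
            have hd' : (!digits.isEmpty) = true := by simp [hd]
            rw [hsd, h4', hd']
            simp only [Bool.true_and, if_true]
            congr 1
            · refine pv_all_congr_mem _ _ _ fun i hi => ?_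
              rw [List.mem_range'_1] at hi
              have hi2 : i < digits.length := by omega
              rw [pv_beq_succ, pv_getD_map digits i hi2, pv_getD_map digits (i - 1) (by omega)]
            · refine pv_all_congr_mem _ _ _ fun i hi => ?_
              rw [List.mem_range'_1] at hi
              have hi2 : i < digits.length := by omega
              rw [pv_beq_pred, pv_getD_map digits i hi2, pv_getD_map digits (i - 1) (by omega)]
        rw [hseq]
        by_cases hsv : (!digits.isEmpty &&
                (((List.range' 1 (ns.length - 1)).all fun i =>
                    (digits.map fun c => (c.toNat : Int) - 48).getD i 0
                      - (digits.map fun c => (c.toNat : Int) - 48).getD (i - 1) 0 == 1)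
                 || ((List.range' 1 (ns.length - 1)).all fun i =>
                    (digits.map fun c => (c.toNat : Int) - 48).getD i 0
                      - (digits.map fun c => (c.toNat : Int) - 48).getD (i - 1) 0 == -1))) = true
        · rw [if_pos hsv, if_pos hsv]
        · rw [if_neg hsv, if_neg hsv]
          rw [pv_period_eq ns 2 (by norm_num) (by omega)]
          rw [decide_eq_true (show (4:Nat) ≤ ns.length by omega)]
          by_cases h6 : 6 ≤ ns.length
          · rw [pv_period_eq ns 3 (by norm_num) (by omega)]
            simp only [Bool.true_and]
          · rw [decide_eq_false h6]
            simp only [Bool.true_and, Bool.false_and, Bool.false_eq_true, if_false]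

-- ===== VERDICT (by name: the statement is the Claim_ definition above) =====
theorem not_repeating_pattern_spec : Claim_equal_not_repeating_pattern := by
  intro value _
  unfold Spec_not_repeating_pattern not_repeating_pattern not_repeating_pattern_alt
  exact pv_main value.toList
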